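-- pv_equiv track=rewrite | github.com/iamspriyadarshi/analyzing_frequency_matrix | analyzing_frequency_matrix.py | freq_dict_of_lists_v1
-- ===== SOURCE A (Python) =====
-- def freq_dict_of_lists_v1(dna_list):
--     n = max([len(dna) for dna in dna_list])
--     frequency_matrix = {
--         'A': [0]*n,
--         'C': [0]*n,
--         'G': [0]*n,
--         'T': [0]*n,
--         }
--     for dna in dna_list:
--         for index, base in enumerate(dna):
--             frequency_matrix[base][index] += 1
--     return frequency_matrix
-- ===== SOURCE B (Python) =====
-- def freq_dict_of_lists_v1(dna_list):
--     n = max(len(dna) for dna in dna_list)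
--     return {
--         base: [sum(1 for dna in dna_list if pos < len(dna) and dna[pos] == base)
--                for pos in range(n)]
--         for base in 'ACGT'
--     }
-- ===== Notes on version B (the rewrite author's own statement) =====
-- stated objective: alternative
-- what changed: B computes each (base, position) cell of the frequency matrix directly with a counting comprehension over the strings (column/cell-first), instead of A's in-place mutation of a preallocated matrix while walking each string character by character.
-- outside the precondition, e.g. on freq_dict_of_lists_v1([]): A raises ValueError, B raises ValueError; on freq_dict_of_lists_v1(['AB']): A raises KeyError, B returns {'A': [1, 0], 'C': [0, 0], 'G': [0, 0], 'T': [0, 0]}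
import Mathlib
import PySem

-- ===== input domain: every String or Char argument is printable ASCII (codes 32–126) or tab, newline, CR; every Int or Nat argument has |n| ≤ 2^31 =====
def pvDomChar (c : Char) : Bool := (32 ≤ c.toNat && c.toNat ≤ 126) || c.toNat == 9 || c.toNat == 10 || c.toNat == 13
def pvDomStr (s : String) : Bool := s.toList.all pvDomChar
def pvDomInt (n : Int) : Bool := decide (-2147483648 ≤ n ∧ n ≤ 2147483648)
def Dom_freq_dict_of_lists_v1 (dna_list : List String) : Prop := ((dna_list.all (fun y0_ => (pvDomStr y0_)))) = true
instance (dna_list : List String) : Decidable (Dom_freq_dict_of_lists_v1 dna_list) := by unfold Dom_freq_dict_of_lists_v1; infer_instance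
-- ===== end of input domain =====

-- B computes each (base, position) cell of the frequency matrix directly by a counting
-- comprehension over the strings, instead of A's in-place mutation of the matrix while
-- walking each string; alternative decomposition, no speed claim.

-- ===== PORT A =====
def freq_dict_of_lists_v1 (dna_list : List String) : List (String × List Int) :=
  let n : Nat := ((dna_list.map (fun (dna : String) => dna.toList.length)).max?).getD 0
  let frequency_matrix : PySem.Dict String (List Int) :=
    ((((PySem.Dict.empty.insert "A" (List.replicate n (0:Int))).insert "C"
        (List.replicate n 0)).insert "G" (List.replicate n 0)).insert "T" (List.replicate n 0))
  (dna_list.foldl (fun d dna =>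
      (dna.toList.zipIdx.foldl
        (fun d p => d.modify (String.ofList [p.1]) [] (fun l => l.modify p.2 (· + 1))) d))
    frequency_matrix).items

-- ===== PORT B =====
def freq_dict_of_lists_v1_alt (dna_list : List String) : List (String × List Int) :=
  let n : Nat := ((dna_list.map (fun (dna : String) => dna.toList.length)).max?).getD 0
  ['A','C','G','T'].map (fun base =>
    (String.ofList [base],
     (List.range n).map (fun pos =>
       dna_list.foldl (fun acc dna =>
         acc + (if pos < dna.toList.length ∧ dna.toList.getD pos ' ' = base then (1:Int) else 0)) 0)))

-- ===== PRECONDITION & SPEC =====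
-- Pre_ excludes the empty list (Python max([]) raises ValueError) and any string containing a
-- character outside {A,C,G,T} (the dict lookup frequency_matrix[base] raises KeyError).
def Pre_freq_dict_of_lists_v1 (dna_list : List String) : Prop :=
  dna_list ≠ [] ∧
  dna_list.all (fun s => s.toList.all (fun c => (['A','C','G','T'] : List Char).contains c)) = true
instance (dna_list : List String) : Decidable (Pre_freq_dict_of_lists_v1 dna_list) := by
  unfold Pre_freq_dict_of_lists_v1; infer_instance

def pvWitness_freq_dict_of_lists_v1 : List String := ["ACGT", "AA"]

def Spec_freq_dict_of_lists_v1 (dna_list : List String) (out : List (String × List Int)) : Prop :=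
  out = freq_dict_of_lists_v1_alt dna_list
instance (dna_list : List String) (out : List (String × List Int)) :
    Decidable (Spec_freq_dict_of_lists_v1 dna_list out) := by
  unfold Spec_freq_dict_of_lists_v1; infer_instance

-- ===== CLAIM (what is proved, stated in full; the proofs are below) =====
def Claim_equal_freq_dict_of_lists_v1 : Prop := ∀ (dna_list : List String),
  Dom_freq_dict_of_lists_v1 dna_list → Pre_freq_dict_of_lists_v1 dna_list →
  Spec_freq_dict_of_lists_v1 dna_list (freq_dict_of_lists_v1 dna_list)

-- ===== LEMMAS AND PROOFS =====

theorem smk_inj {a b : Char} (h : String.ofList [a] = String.ofList [b]) : a = b := by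
  have := congrArg String.toList h; simpa using this

-- A's inner loop over one string: the matrix value at key b, position j, gains 1 iff s has b at j
theorem step_string (s : List Char) : ∀ (k0 : Nat) (d : PySem.Dict String (List Int)) (b : Char) (j : Nat),
    (((s.zipIdx k0).foldl
        (fun d p => d.modify (String.ofList [p.1]) [] (fun l => l.modify p.2 (· + 1))) d).getD
      (String.ofList [b]) [])[j]? =
    ((d.getD (String.ofList [b]) [])[j]?).map
      (fun x => x + (if k0 ≤ j ∧ s[j - k0]? = some b then 1 else 0)) := by
  induction s with
  | nil =>
    intro k0 d b j
    simp
  | cons c s ih =>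
    intro k0 d b j
    rw [List.zipIdx_cons, List.foldl_cons, ih]
    rw [PySem.Dict.getD_modify]
    by_cases hbc : (String.ofList [b] : String) = String.ofList [c]
    · have hb : b = c := smk_inj hbc
      subst hb
      rw [if_pos hbc, List.getElem?_modify]
      cases hx : (d.getD (String.ofList [b]) [])[j]? with
      | none => simp
      | some x =>
        simp only [Option.map_some]
        by_cases hj : k0 = j
        · subst hj
          have h1 : ¬ (k0 + 1 ≤ k0) := by omega
          simp [h1]
        · by_cases hlt : k0 ≤ j
          · have hgt : k0 + 1 ≤ j := by omega
            have hid : j - k0 = (j - (k0+1)) + 1 := by omega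
            simp [hj, hlt, hgt, hid]
          · have h2 : ¬ (k0 + 1 ≤ j) := by omega
            simp [hj, hlt, h2]
    · have hb : b ≠ c := fun h => hbc (by rw [h])
      rw [if_neg hbc]
      cases hx : (d.getD (String.ofList [b]) [])[j]? with
      | none => simp
      | some x =>
        simp only [Option.map_some]
        by_cases hlt : k0 ≤ j
        · by_cases hj : k0 = j
          · subst hj
            have h1 : ¬ (k0 + 1 ≤ k0) := by omega
            simp [h1]
            intro h; exact absurd h.symm hb
          · have hgt : k0 + 1 ≤ j := by omega
            have hid : j - k0 = (j - (k0+1)) + 1 := by omega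
            simp [hlt, hgt, hid]
        · have h2 : ¬ (k0 + 1 ≤ j) := by omega
          simp [hlt, h2]

-- A's whole outer loop, pointwise: each cell gains the number of strings with base b at position j
theorem outer_loop (L : List String) : ∀ (d : PySem.Dict String (List Int)) (b : Char) (j : Nat),
    ((L.foldl (fun d dna =>
        (dna.toList.zipIdx.foldl
          (fun d p => d.modify (String.ofList [p.1]) [] (fun l => l.modify p.2 (· + 1))) d)) d).getD
      (String.ofList [b]) [])[j]? =
    ((d.getD (String.ofList [b]) [])[j]?).map
      (fun x => x + (L.map (fun s => if s.toList[j]? = some b then (1:Int) else 0)).sum) := by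
  induction L with
  | nil => intro d b j; simp
  | cons s L ih =>
    intro d b j
    rw [List.foldl_cons, ih, step_string]
    cases hx : (d.getD (String.ofList [b]) [])[j]? with
    | none => simp
    | some x =>
      simp only [Option.map_some, List.map_cons, List.sum_cons]
      simp
      ring

theorem keys_inner (s : List Char) : ∀ (k0 : Nat) (d : PySem.Dict String (List Int)),
    (∀ c ∈ s, (String.ofList [c]) ∈ d.keys) →
    ((s.zipIdx k0).foldl
      (fun d p => d.modify (String.ofList [p.1]) [] (fun l => l.modify p.2 (· + 1))) d).keys = d.keys := by
  induction s with
  | nil => intro k0 d h; simp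
  | cons c s ih =>
    intro k0 d h
    rw [List.zipIdx_cons, List.foldl_cons]
    have hc : (String.ofList [c]) ∈ d.keys := h c (by simp)
    have hk : (d.modify (String.ofList [c]) [] (fun l => l.modify k0 (· + 1))).keys = d.keys := by
      rw [PySem.Dict.keys_modify, PySem.Dict.keys_insert_of_contains]
      exact (PySem.Dict.contains_iff_mem_keys _ _).mpr hc
    rw [ih (k0+1) _ (by rw [hk]; exact fun c' hc' => h c' (by simp [hc']))]
    exact hk

theorem keys_outer (L : List String) : ∀ (d : PySem.Dict String (List Int)),
    (∀ s ∈ L, ∀ c ∈ s.toList, (String.ofList [c]) ∈ d.keys) →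
    ((L.foldl (fun d dna =>
        (dna.toList.zipIdx.foldl
          (fun d p => d.modify (String.ofList [p.1]) [] (fun l => l.modify p.2 (· + 1))) d)) d)).keys = d.keys := by
  induction L with
  | nil => intro d h; simp
  | cons s L ih =>
    intro d h
    rw [List.foldl_cons]
    have hk := keys_inner s.toList 0 d (fun c hc => h s (by simp) c hc)
    rw [ih _ (by rw [hk]; exact fun s' hs' c hc => h s' (by simp [hs']) c hc)]
    exact hk

theorem cond_iff (t : List Char) (j : Nat) (b : Char) :
    (t[j]? = some b) ↔ (j < t.length ∧ t.getD j ' ' = b) := by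
  rw [List.getD_eq_getElem?_getD]
  cases h : t[j]? with
  | none =>
    have := List.getElem?_eq_none_iff.mp h
    simp; omega
  | some x =>
    have := (List.getElem?_eq_some_iff.mp h).1
    simp [this]

theorem keys_init (z : List Int) :
    (((((PySem.Dict.empty.insert "A" z).insert "C" z).insert "G" z).insert "T" z)).keys
      = ["A", "C", "G", "T"] := by
  simp [PySem.Dict.keys_insert_of_not_contains, PySem.Dict.contains_insert]

theorem getD_init (z : List Int) (b : Char) (hb : b ∈ (['A','C','G','T'] : List Char)) :
    (((((PySem.Dict.empty.insert "A" z).insert "C" z).insert "G" z).insert "T" z)).getD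
      (String.ofList [b]) [] = z := by
  fin_cases hb <;> simp [PySem.Dict.getD_insert]

-- ===== VERDICT (by name: the statement is the Claim_ definition above) =====
theorem freq_dict_of_lists_v1_spec : Claim_equal_freq_dict_of_lists_v1 := by
  intro L _ hpre
  unfold Spec_freq_dict_of_lists_v1 freq_dict_of_lists_v1 freq_dict_of_lists_v1_alt
  have hall : ∀ s ∈ L, ∀ c ∈ s.toList, c ∈ (['A','C','G','T'] : List Char) := by
    have := hpre.2
    simp only [List.all_eq_true, List.contains_iff_mem] at this
    exact fun s hs c hc => by simpa using this s hs c hc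
  set n : Nat := ((L.map (fun (dna : String) => dna.toList.length)).max?).getD 0 with hn
  set d0 : PySem.Dict String (List Int) :=
    ((((PySem.Dict.empty.insert "A" (List.replicate n (0:Int))).insert "C"
        (List.replicate n 0)).insert "G" (List.replicate n 0)).insert "T" (List.replicate n 0)) with hd0
  set dfin := (L.foldl (fun d dna =>
      (dna.toList.zipIdx.foldl
        (fun d p => d.modify (String.ofList [p.1]) [] (fun l => l.modify p.2 (· + 1))) d)) d0) with hdfin
  have hkeys : dfin.keys = ["A", "C", "G", "T"] := by
    rw [hdfin, keys_outer L d0 ?_, hd0, keys_init]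
    intro s hs c hc
    have := hall s hs c hc
    rw [hd0, keys_init]
    fin_cases this <;> simp
  have hval : ∀ b ∈ (['A','C','G','T'] : List Char), dfin.getD (String.ofList [b]) [] =
      (List.range n).map (fun pos =>
        L.foldl (fun acc dna =>
          acc + (if pos < dna.toList.length ∧ dna.toList.getD pos ' ' = b then (1:Int) else 0)) 0) := by
    intro b hb
    apply List.ext_getElem?
    intro j
    rw [hdfin, outer_loop L d0 b j, hd0, getD_init _ b hb]
    by_cases hj : j < n
    · rw [List.getElem?_eq_getElem (by simpa using hj),
        List.getElem?_eq_getElem (by simpa using hj)]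
      simp only [List.getElem_replicate, List.getElem_map, List.getElem_range, Option.map_some]
      rw [PySem.List.foldl_add]
      have hmap : ∀ (s : String), (if s.toList[j]? = some b then (1:Int) else 0) =
          (if j < s.toList.length ∧ s.toList.getD j ' ' = b then (1:Int) else 0) := by
        intro s
        by_cases h : s.toList[j]? = some b
        · rw [if_pos h, if_pos ((cond_iff _ _ _).mp h)]
        · rw [if_neg h, if_neg (fun hc => h ((cond_iff _ _ _).mpr hc))]
      simp only [hmap]
    · rw [List.getElem?_eq_none (by simpa using hj),
        List.getElem?_eq_none (by simpa using hj)]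
      simp
  rw [PySem.Dict.items_eq_map_keys dfin (by rw [hkeys]; decide) [], hkeys]
  have hA : ("A" : String) = String.ofList ['A'] := rfl
  have hC : ("C" : String) = String.ofList ['C'] := rfl
  have hG : ("G" : String) = String.ofList ['G'] := rfl
  have hT : ("T" : String) = String.ofList ['T'] := rfl
  simp only [List.map_cons, List.map_nil]
  rw [hA, hC, hG, hT,
    hval 'A' (by decide), hval 'C' (by decide), hval 'G' (by decide), hval 'T' (by decide)]
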